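-- pv_equiv track=rewrite | github.com/Rizvee-Hassan-Prito/DocuMind | backend/langchain_pipeline.py | sentence_tokenize
-- ===== SOURCE A (Python) =====
-- def sentence_tokenize(text: str):
--     sentence_endings = {"\n\n", '\n'}
--     sentences = []
--     sentence = ""
--
--     for char in text:
--         sentence += char
--         if char in sentence_endings:
--             trimmed = sentence.strip()
--             if trimmed:
--                 sentences.append(trimmed)
--             sentence = ""
--
--     return sentences
-- ===== SOURCE B (Python) =====
-- def sentence_tokenize(text: str):
--     # Cursor scan: jump from newline to newline with str.find instead of
--     # growing a per-character buffer; the piece after the last newline is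
--     # never emitted, as in the original.
--     segs = []
--     start = 0
--     while True:
--         idx = text.find('\n', start)
--         if idx == -1:
--             break
--         segs.append(text[start:idx])
--         start = idx + 1
--     return [t for t in (seg.strip() for seg in segs) if t]
-- ===== Notes on version B (the rewrite author's own statement) =====
-- stated objective: faster
-- what changed: Replaces the per-character buffer-growing loop with a cursor scan that jumps between newlines via str.find, collecting raw segments first and then stripping/filtering them in one comprehension.
import Mathlib
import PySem

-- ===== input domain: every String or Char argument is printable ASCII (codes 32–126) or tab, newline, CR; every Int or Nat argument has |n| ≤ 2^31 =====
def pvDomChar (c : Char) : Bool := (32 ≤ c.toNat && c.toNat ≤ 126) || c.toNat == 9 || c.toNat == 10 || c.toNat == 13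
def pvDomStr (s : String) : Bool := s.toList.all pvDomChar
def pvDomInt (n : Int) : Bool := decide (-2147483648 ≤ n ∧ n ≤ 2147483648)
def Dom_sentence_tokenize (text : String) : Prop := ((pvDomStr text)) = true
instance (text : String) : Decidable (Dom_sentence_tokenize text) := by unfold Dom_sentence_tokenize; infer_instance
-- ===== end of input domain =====

-- B replaces A's per-character buffer growth by a cursor scan that jumps from
-- newline to newline (str.find) and then strips/filters the raw segments (idiomatic).


-- ===== PORT A =====
-- loop body of A: grow the buffer, on a newline strip it and collect if non-empty
def pvStepA (st : List (List Char) × List Char) (c : Char) : List (List Char) × List Char :=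
  let sentence := st.2 ++ [c]
  if ([['\n', '\n'], ['\n']] : List (List Char)).contains [c] then
    (if PySem.Chars.strip sentence ≠ [] then st.1 ++ [PySem.Chars.strip sentence] else st.1,
     ([] : List Char))
  else
    (st.1, sentence)

def sentence_tokenize (text : String) : List String :=
  ((text.toList.foldl pvStepA ([], [])).1).map String.ofList

-- ===== PORT B =====
-- Source B's cursor loop: text.find('\n', start) / text[start:idx] / start = idx+1 is,
-- on the remaining suffix, exactly "take up to the first newline, recurse past it";
-- a missing newline (find = -1, dropWhile = []) ends the loop.
def pvSegsB (cs : List Char) : List (List Char) :=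
  match h : cs.dropWhile (· != '\n') with
  | [] => []
  | _ :: tail => cs.takeWhile (· != '\n') :: pvSegsB tail
termination_by cs.length
decreasing_by
  have hle := List.length_dropWhile_le (· != '\n') cs
  rw [h] at hle; simp at hle; omega

def sentence_tokenize_alt (text : String) : List String :=
  ((((pvSegsB text.toList).map PySem.Chars.strip).filter (· ≠ [])).map String.ofList)

-- ===== PRECONDITION & SPEC =====
def Spec_sentence_tokenize (text : String) (out : List String) : Prop := out = sentence_tokenize_alt text
instance (text : String) (out : List String) : Decidable (Spec_sentence_tokenize text out) := by unfold Spec_sentence_tokenize; infer_instance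

-- ===== CLAIM (what is proved, stated in full; the proofs are below) =====
def Claim_equal_sentence_tokenize : Prop := ∀ (text : String), Dom_sentence_tokenize text → Spec_sentence_tokenize text (sentence_tokenize text)

-- ===== LEMMAS AND PROOFS =====

-- stripping cannot see a trailing newline
lemma pvStrip_append_newline (xs : List Char) :
    PySem.Chars.strip (xs ++ ['\n']) = PySem.Chars.strip xs := by
  have hnl : PySem.Chars.isspace '\n' = true := by decide
  unfold PySem.Chars.strip PySem.Chars.lstrip PySem.Chars.rstrip
  rw [List.dropWhile_append]
  by_cases h : (List.dropWhile PySem.Chars.isspace xs).isEmpty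
  · simp [hnl, List.isEmpty_iff.mp h]
  · simp [h, List.reverse_append, hnl]

lemma pvSegsB_no_newline {cs : List Char} (h : '\n' ∉ cs) : pvSegsB cs = [] := by
  have hd : cs.dropWhile (· != '\n') = [] := by
    rw [List.dropWhile_eq_nil_iff]; intro x hx
    simp only [bne_iff_ne, ne_eq]; intro he; subst he; exact h hx
  rw [pvSegsB]
  split
  · rfl
  · next x tail heq => rw [hd] at heq; cases heq

lemma pvSegsB_split {sent : List Char} (hs : '\n' ∉ sent) (cs : List Char) :
    pvSegsB (sent ++ '\n' :: cs) = sent :: pvSegsB cs := by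
  have hd : (sent ++ '\n' :: cs).dropWhile (· != '\n') = '\n' :: cs := by
    rw [List.dropWhile_append]
    have h1 : sent.dropWhile (· != '\n') = [] := by
      rw [List.dropWhile_eq_nil_iff]; intro x hx
      simp only [bne_iff_ne, ne_eq]; intro he; subst he; exact hs hx
    simp [h1]
  have ht : (sent ++ '\n' :: cs).takeWhile (· != '\n') = sent := by
    rw [List.takeWhile_append]
    have h1 : sent.takeWhile (· != '\n') = sent := by
      rw [List.takeWhile_eq_self_iff]; intro x hx
      simp only [bne_iff_ne, ne_eq]; intro he; subst he; exact hs hx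
    simp [h1]
  rw [pvSegsB]
  split
  · next heq => rw [hd] at heq; cases heq
  · next x tail heq =>
      rw [hd] at heq
      obtain ⟨-, rfl⟩ := List.cons.injEq .. ▸ heq
      rw [ht]

-- loop invariant: A's fold from (acc, sent) produces acc ++ B's segments of sent ++ cs
lemma pvFold_eq (cs : List Char) (acc : List (List Char)) (sent : List Char)
    (hs : '\n' ∉ sent) :
    (cs.foldl pvStepA (acc, sent)).1
      = acc ++ ((pvSegsB (sent ++ cs)).map PySem.Chars.strip).filter (· ≠ []) := by
  induction cs generalizing acc sent with
  | nil => simp [pvSegsB_no_newline (by simpa using hs)]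
  | cons c cs ih =>
    by_cases hc : c = '\n'
    · subst hc
      have hstep : pvStepA (acc, sent) '\n'
          = (if PySem.Chars.strip sent ≠ [] then acc ++ [PySem.Chars.strip sent] else acc, []) := by
        simp [pvStepA, pvStrip_append_newline]
      rw [List.foldl_cons, hstep, ih _ [] (by simp), pvSegsB_split hs]
      by_cases hne : PySem.Chars.strip sent = [] <;> simp [hne]
    · have hstep : pvStepA (acc, sent) c = (acc, sent ++ [c]) := by
        simp [pvStepA, hc]
      rw [List.foldl_cons, hstep,
        ih acc (sent ++ [c]) (by simp [hs, Ne.symm hc]),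
        List.append_assoc]
      simp

-- ===== VERDICT (by name: the statement is the Claim_ definition above) =====
theorem sentence_tokenize_spec : Claim_equal_sentence_tokenize := by
  intro text _
  unfold Spec_sentence_tokenize sentence_tokenize sentence_tokenize_alt
  rw [pvFold_eq text.toList [] [] (by simp)]
  simp
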